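-- pv_equiv track=rewrite | github.com/githabideri/homedoc-spektor | spektor/sysprobe.py | _parse_dmidecode_bios
-- ===== SOURCE A (Python) =====
-- from typing import Any, Dict, Iterable, List, Optional
--
-- def _parse_dmidecode_bios(output: str) -> Dict[str, Optional[str]]:
--     vendor = version = date = None
--     for line in output.splitlines():
--         line = line.strip()
--         if line.startswith("Vendor:"):
--             vendor = line.split(":", 1)[1].strip() or None
--         elif line.startswith("Version:"):
--             version = line.split(":", 1)[1].strip() or None
--         elif line.startswith("Release Date:"):
--             date = line.split(":", 1)[1].strip() or None
--     return {"bios_vendor": vendor, "bios_version": version, "bios_date": date}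
-- ===== SOURCE B (Python) =====
-- def _parse_dmidecode_bios(output: str):
--     lines = output.splitlines()[::-1]
--
--     def last_value(prefix):
--         for line in lines:
--             line = line.strip()
--             if line.startswith(prefix):
--                 return line[len(prefix):].strip() or None
--         return None
--
--     return {
--         "bios_vendor": last_value("Vendor:"),
--         "bios_version": last_value("Version:"),
--         "bios_date": last_value("Release Date:"),
--     }
-- ===== Notes on version B (the rewrite author's own statement) =====
-- stated objective: alternative
-- what changed: B replaces A's single forward scan with a three-branch accumulator (last occurrence wins by overwriting) by reversing the line list once and running three independent staged scans, each returning at the FIRST matching line (= A's last occurrence) and slicing off the prefix instead of splitting on the colon.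
import Mathlib
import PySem

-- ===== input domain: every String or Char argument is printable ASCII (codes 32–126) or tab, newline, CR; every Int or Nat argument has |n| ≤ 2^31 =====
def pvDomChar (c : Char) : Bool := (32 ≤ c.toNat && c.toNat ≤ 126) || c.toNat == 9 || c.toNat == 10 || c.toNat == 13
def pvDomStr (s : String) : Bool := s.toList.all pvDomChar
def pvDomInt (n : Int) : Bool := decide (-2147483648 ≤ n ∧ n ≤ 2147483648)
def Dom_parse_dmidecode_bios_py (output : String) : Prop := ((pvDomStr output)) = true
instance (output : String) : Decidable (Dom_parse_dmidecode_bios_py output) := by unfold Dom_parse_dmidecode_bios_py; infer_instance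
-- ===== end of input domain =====

-- B reverses the line list once and runs three independent staged scans, each returning at the
-- FIRST matching line (= A's last occurrence, which A keeps by overwriting in one forward scan)
-- and slicing off the prefix instead of splitting on the colon (objective: alternative).

-- ===== PORT A =====
-- `s or None` on a stripped string
def pvOrNone (s : String) : Option String :=
  if s = "" then none else some s

-- line.split(":", 1)[1]; A calls it only on lines that start with "<key>:", so index 1 exists
def pvSplitSecond (line : String) : String :=
  match PySem.Str.splitMax? line ":" 1 with
  | some (_ :: rest :: _) => rest
  | _ => ""

-- the body of A's for-loop over splitlines, on the state (vendor, version, date)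
def pvStepA (st : Option String × Option String × Option String) (line : String) :
    Option String × Option String × Option String :=
  let line := PySem.Str.strip line
  if PySem.Str.startswith line "Vendor:" then
    (pvOrNone (PySem.Str.strip (pvSplitSecond line)), st.2.1, st.2.2)
  else if PySem.Str.startswith line "Version:" then
    (st.1, pvOrNone (PySem.Str.strip (pvSplitSecond line)), st.2.2)
  else if PySem.Str.startswith line "Release Date:" then
    (st.1, st.2.1, pvOrNone (PySem.Str.strip (pvSplitSecond line)))
  else st

def parse_dmidecode_bios_py (output : String) : List (String × Option String) :=
  let st := (PySem.Str.splitlines output).foldl pvStepA (none, none, none)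
  [("bios_vendor", st.1), ("bios_version", st.2.1), ("bios_date", st.2.2)]

-- ===== PORT B =====
-- B's inner `last_value`: early-return loop over the reversed lines
def pvLastValue : List String → String → Option String
  | [], _ => none
  | l :: rest, pre =>
      let l := PySem.Str.strip l
      if PySem.Str.startswith l pre then
        pvOrNone (PySem.Str.strip (PySem.Str.slice l (some (PySem.Str.len pre : Int)) none))
      else pvLastValue rest pre

def parse_dmidecode_bios_py_alt (output : String) : List (String × Option String) :=
  -- lines = output.splitlines()[::-1]
  let lines := (PySem.List.slice? (PySem.Str.splitlines output) none none (-1)).getD []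
  [("bios_vendor", pvLastValue lines "Vendor:"),
   ("bios_version", pvLastValue lines "Version:"),
   ("bios_date", pvLastValue lines "Release Date:")]

-- ===== PRECONDITION & SPEC =====
def Spec_parse_dmidecode_bios_py (output : String) (out : List (String × Option String)) : Prop := out = parse_dmidecode_bios_py_alt output
instance (output : String) (out : List (String × Option String)) : Decidable (Spec_parse_dmidecode_bios_py output out) := by unfold Spec_parse_dmidecode_bios_py; infer_instance

-- ===== CLAIM (what is proved, stated in full; the proofs are below) =====
def Claim_equal_parse_dmidecode_bios_py : Prop := ∀ (output : String), Dom_parse_dmidecode_bios_py output → Spec_parse_dmidecode_bios_py output (parse_dmidecode_bios_py output)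

-- ===== LEMMAS AND PROOFS =====

-- split a character list at its FIRST colon
def pvFcs : List Char → Option (List Char × List Char)
  | [] => none
  | c :: rest =>
      if c = ':' then some ([], rest)
      else (pvFcs rest).map (fun p => (c :: p.1, p.2))

theorem pvFcs_append (k v : List Char) (hk : (':' : Char) ∉ k) :
    pvFcs (k ++ ':' :: v) = some (k, v) := by
  induction k with
  | nil => simp [pvFcs]
  | cons c rest ih =>
      have hc : c ≠ ':' := by intro h; exact hk (by simp [h])
      simp only [List.cons_append, pvFcs, if_neg hc,
        ih (fun h => hk (List.mem_cons_of_mem _ h)), Option.map_some]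

theorem pvFcs_none_iff (s : List Char) :
    pvFcs s = none ↔ (':' : Char) ∉ s := by
  induction s with
  | nil => simp [pvFcs]
  | cons c rest ih =>
      by_cases hc : c = ':'
      · subst hc; simp [pvFcs]
      · simp [pvFcs, hc, ih, Ne.symm hc]

theorem pvFcs_some (s k v : List Char) (h : pvFcs s = some (k, v)) :
    s = k ++ ':' :: v ∧ (':' : Char) ∉ k := by
  induction s generalizing k v with
  | nil => simp [pvFcs] at h
  | cons c rest ih =>
      by_cases hc : c = ':'
      · subst hc
        simp only [pvFcs] at h
        obtain ⟨rfl, rfl⟩ := h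
        exact ⟨rfl, by simp⟩
      · simp only [pvFcs, if_neg hc] at h
        match hrest : pvFcs rest with
        | none => rw [hrest] at h; simp at h
        | some (k', v') =>
            rw [hrest] at h
            simp only [Option.map_some, Option.some_inj, Prod.mk.injEq] at h
            obtain ⟨hk, hv⟩ := h
            obtain ⟨hs, hnk⟩ := ih k' v' hrest
            subst hv; rw [← hk]
            exact ⟨by simp [hs], by simp [hnk, Ne.symm hc]⟩

theorem pv_splitOnMax_go_zero (sep : List Char) (fuel : Nat) (s cur : List Char)
    (accs : List (List Char)) :
    PySem.Chars.splitOnMax.go sep fuel 0 s cur accs = ((cur.reverse ++ s) :: accs).reverse := by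
  cases fuel with
  | zero => cases s <;> rfl
  | succ n => cases s <;> simp [PySem.Chars.splitOnMax.go]

theorem pv_splitOnMax_go_one (s : List Char) (fuel : Nat) (hf : s.length < fuel)
    (cur : List Char) (accs : List (List Char)) :
    PySem.Chars.splitOnMax.go [':'] fuel 1 s cur accs =
      match pvFcs s with
      | none => ((cur.reverse ++ s) :: accs).reverse
      | some (k, v) => accs.reverse ++ [cur.reverse ++ k, v] := by
  induction s generalizing fuel cur accs with
  | nil =>
      cases fuel with
      | zero => omega
      | succ n => simp [PySem.Chars.splitOnMax.go, pvFcs]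
  | cons c rest ih =>
      cases fuel with
      | zero => omega
      | succ n =>
        by_cases hc : c = ':'
        · subst hc
          simp only [PySem.Chars.splitOnMax.go, pvFcs]
          rw [show (List.isPrefixOf [':'] (':' :: rest)) = true by simp [List.isPrefixOf]]
          simp only [if_true]
          rw [pv_splitOnMax_go_zero]
          simp
        · have hpre : List.isPrefixOf [':'] (c :: rest) = false := by
            simp [List.isPrefixOf, Ne.symm hc]
          simp only [PySem.Chars.splitOnMax.go, hpre]
          rw [if_neg (by omega : ¬ (1 : Nat) = 0)]
          simp only [Bool.false_eq_true, if_false]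
          rw [ih n (by simpa using Nat.lt_of_succ_lt_succ hf) (c :: cur) accs]
          simp only [pvFcs, if_neg hc]
          match hrest : pvFcs rest with
          | none => simp
          | some (k, v) => simp

theorem pv_splitMax_colon (s : List Char) :
    PySem.Chars.splitMax? s [':'] 1 =
      some (match pvFcs s with
            | none => [s]
            | some (k, v) => [k, v]) := by
  have h1 : ¬ ((1 : Int) < 0) := by omega
  simp only [PySem.Chars.splitMax?, PySem.Chars.splitOnMax, List.isEmpty_cons,
    if_neg h1, Bool.false_eq_true, if_false, Int.toNat_one]
  rw [pv_splitOnMax_go_one s (s.length + 1) (by omega) [] []]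
  match hfcs : pvFcs s with
  | none => simp
  | some (k, v) => simp

theorem pv_str_splitMax_colon (t : String) (k v : List Char)
    (h : pvFcs t.toList = some (k, v)) :
    PySem.Str.splitMax? t ":" 1 = some [String.ofList k, String.ofList v] := by
  have hc : (":" : String).toList = [':'] := rfl
  simp [PySem.Str.splitMax?, hc, pv_splitMax_colon, h]

theorem pv_startswith_colon_iff (k v q : List Char)
    (hk : (':' : Char) ∉ k) (hq : (':' : Char) ∉ q) :
    PySem.Chars.startswith (k ++ ':' :: v) (q ++ [':']) = true ↔ k = q := by
  rw [PySem.Chars.startswith_iff]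
  constructor
  · rintro ⟨r, hr⟩
    have h1 : pvFcs (k ++ ':' :: v) = some (k, v) := pvFcs_append k v hk
    have h2 : pvFcs (q ++ ':' :: r) = some (q, r) := pvFcs_append q r hq
    have heq : q ++ ':' :: r = k ++ ':' :: v := by simpa using hr
    rw [heq] at h2; rw [h1] at h2
    exact ((by simpa using h2 : k = q ∧ v = r)).1
  · rintro rfl; exact ⟨v, by simp⟩

-- no colon in the line ⇒ all three of A's prefix tests (and B's) are false
theorem pv_startswith_false_of_no_colon (s q : List Char) (hs : (':' : Char) ∉ s) :
    PySem.Chars.startswith s (q ++ [':']) = false := by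
  by_contra h
  have h' : (q ++ [':']) <+: s :=
    (PySem.Chars.startswith_iff _ _).mp
      (by revert h; cases PySem.Chars.startswith s (q ++ [':']) <;> simp)
  obtain ⟨r, hr⟩ := h'
  apply hs; rw [← hr]; simp

theorem pv_drop_key (k v : List Char) : List.drop (k.length + 1) (k ++ ':' :: v) = v := by
  have h : k ++ ':' :: v = (k ++ [':']) ++ v := by simp
  have hl : (k ++ [':']).length = k.length + 1 := by simp
  rw [h, ← hl, List.drop_left]

-- B's scan value at a matching line equals A's split-based value
theorem pv_slice_eq_ofList (l : String) (q k v : List Char)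
    (hsplit : l.toList = k ++ ':' :: v) (hk : k = q)
    (n : Nat) (hn : (n : Int) = ((q.length + 1 : Nat) : Int)) :
    PySem.Str.slice l (some (n : Int)) none = String.ofList v := by
  apply String.toList_inj.mp
  rw [PySem.Str.toList_slice, PySem.Chars.slice_eq_listSlice]
  rw [hn, PySem.List.slice_from_natCast, hsplit, hk, pv_drop_key]
  simp

-- `pvLastValue` with an explicit default (proof-only generalisation of B's inner loop)
def pvLV : List String → String → Option String → Option String
  | [], _, d => d
  | l :: rest, pre, d =>
      let l := PySem.Str.strip l
      if PySem.Str.startswith l pre then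
        pvOrNone (PySem.Str.strip (PySem.Str.slice l (some (PySem.Str.len pre : Int)) none))
      else pvLV rest pre d

theorem pvLastValue_eq_pvLV (lines : List String) (pre : String) :
    pvLastValue lines pre = pvLV lines pre none := by
  induction lines with
  | nil => rfl
  | cons l rest ih => simp only [pvLastValue, pvLV, ih]

-- one scan step appended at the end updates the default
def pvStepVal (line pre : String) (d : Option String) : Option String :=
  let l := PySem.Str.strip line
  if PySem.Str.startswith l pre then
    pvOrNone (PySem.Str.strip (PySem.Str.slice l (some (PySem.Str.len pre : Int)) none))
  else d

theorem pvLV_append (xs : List String) (l pre : String) (d : Option String) :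
    pvLV (xs ++ [l]) pre d = pvLV xs pre (pvStepVal l pre d) := by
  induction xs with
  | nil => simp only [List.nil_append, pvLV, pvStepVal]
  | cons x rest ih => simp only [List.cons_append, pvLV, ih]

-- A's loop body, component-wise, is one scan step for each of the three prefixes
theorem pv_stepA_eq (st : Option String × Option String × Option String) (line : String) :
    pvStepA st line =
      (pvStepVal line "Vendor:" st.1, pvStepVal line "Version:" st.2.1,
       pvStepVal line "Release Date:" st.2.2) := by
  unfold pvStepA pvStepVal
  set l := PySem.Str.strip line with hl
  have hVnc : (':' : Char) ∉ "Vendor".toList := by decide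
  have hSnc : (':' : Char) ∉ "Version".toList := by decide
  have hDnc : (':' : Char) ∉ "Release Date".toList := by decide
  match hfcs : pvFcs l.toList with
  | none =>
      have hnc : (':' : Char) ∉ l.toList := (pvFcs_none_iff _).mp hfcs
      have hv : PySem.Str.startswith l "Vendor:" = false := by
        rw [PySem.Str.startswith_eq, show ("Vendor:" : String).toList = "Vendor".toList ++ [':'] from rfl]
        exact pv_startswith_false_of_no_colon _ _ hnc
      have hs : PySem.Str.startswith l "Version:" = false := by
        rw [PySem.Str.startswith_eq, show ("Version:" : String).toList = "Version".toList ++ [':'] from rfl]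
        exact pv_startswith_false_of_no_colon _ _ hnc
      have hd : PySem.Str.startswith l "Release Date:" = false := by
        rw [PySem.Str.startswith_eq, show ("Release Date:" : String).toList = "Release Date".toList ++ [':'] from rfl]
        exact pv_startswith_false_of_no_colon _ _ hnc
      simp at hv hs hd
      simp [hv, hs, hd]
  | some (k, v) =>
      obtain ⟨hsplit, hknc⟩ := pvFcs_some _ _ _ hfcs
      have hsm : PySem.Str.splitMax? l ":" 1 = some [String.ofList k, String.ofList v] :=
        pv_str_splitMax_colon l k v hfcs
      have hsecond : pvSplitSecond l = String.ofList v := by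
        simp [pvSplitSecond, hsm]
      have hkey : ∀ q : String, (':' : Char) ∉ q.toList →
          (PySem.Str.startswith l (q ++ ":") = true ↔ String.ofList k = q) := by
        intro q hq
        rw [PySem.Str.startswith_eq]
        have he : (q ++ ":").toList = q.toList ++ [':'] := by simp
        rw [he, hsplit, pv_startswith_colon_iff k v q.toList hknc hq]
        constructor
        · intro h; rw [h]; simp
        · intro h; rw [← h]; simp
      have hkeyF : ∀ q : String, (':' : Char) ∉ q.toList → String.ofList k ≠ q →
          PySem.Str.startswith l (q ++ ":") = false := by
        intro q hq hne
        rcases Bool.eq_false_or_eq_true (PySem.Str.startswith l (q ++ ":")) with hb | hb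
        · exact absurd ((hkey q hq).mp hb) hne
        · exact hb
      have eV : ("Vendor:" : String) = "Vendor" ++ ":" := rfl
      have eS : ("Version:" : String) = "Version" ++ ":" := rfl
      have eD : ("Release Date:" : String) = "Release Date" ++ ":" := rfl
      by_cases hV : String.ofList k = "Vendor"
      · have hswV : PySem.Str.startswith l "Vendor:" = true := by
          rw [eV]; exact (hkey "Vendor" hVnc).mpr hV
        have hswS : PySem.Str.startswith l "Version:" = false := by
          rw [eS]; exact hkeyF "Version" hSnc (by rw [hV]; decide)
        have hswD : PySem.Str.startswith l "Release Date:" = false := by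
          rw [eD]; exact hkeyF "Release Date" hDnc (by rw [hV]; decide)
        have hk' : k = ("Vendor" : String).toList := by rw [← hV]; simp
        have hsl : PySem.Str.slice l (some (PySem.Str.len "Vendor:" : Int)) none = String.ofList v :=
          pv_slice_eq_ofList l ("Vendor" : String).toList k v hsplit hk' _ (by decide)
        simp at hswV hswS hswD
        simp at hsl
        simp [hswV, hswS, hswD, hsecond, hsl]
      by_cases hS : String.ofList k = "Version"
      · have hswV : PySem.Str.startswith l "Vendor:" = false := by
          rw [eV]; exact hkeyF "Vendor" hVnc hV
        have hswS : PySem.Str.startswith l "Version:" = true := by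
          rw [eS]; exact (hkey "Version" hSnc).mpr hS
        have hswD : PySem.Str.startswith l "Release Date:" = false := by
          rw [eD]; exact hkeyF "Release Date" hDnc (by rw [hS]; decide)
        have hk' : k = ("Version" : String).toList := by rw [← hS]; simp
        have hsl : PySem.Str.slice l (some (PySem.Str.len "Version:" : Int)) none = String.ofList v :=
          pv_slice_eq_ofList l ("Version" : String).toList k v hsplit hk' _ (by decide)
        simp at hswV hswS hswD
        simp at hsl
        simp [hswV, hswS, hswD, hsecond, hsl]
      by_cases hD : String.ofList k = "Release Date"
      · have hswV : PySem.Str.startswith l "Vendor:" = false := by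
          rw [eV]; exact hkeyF "Vendor" hVnc hV
        have hswS : PySem.Str.startswith l "Version:" = false := by
          rw [eS]; exact hkeyF "Version" hSnc hS
        have hswD : PySem.Str.startswith l "Release Date:" = true := by
          rw [eD]; exact (hkey "Release Date" hDnc).mpr hD
        have hk' : k = ("Release Date" : String).toList := by rw [← hD]; simp
        have hsl : PySem.Str.slice l (some (PySem.Str.len "Release Date:" : Int)) none = String.ofList v :=
          pv_slice_eq_ofList l ("Release Date" : String).toList k v hsplit hk' _ (by decide)
        simp at hswV hswS hswD
        simp at hsl
        simp [hswV, hswS, hswD, hsecond, hsl]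
      · have hswV : PySem.Str.startswith l "Vendor:" = false := by
          rw [eV]; exact hkeyF "Vendor" hVnc hV
        have hswS : PySem.Str.startswith l "Version:" = false := by
          rw [eS]; exact hkeyF "Version" hSnc hS
        have hswD : PySem.Str.startswith l "Release Date:" = false := by
          rw [eD]; exact hkeyF "Release Date" hDnc hD
        simp at hswV hswS hswD
        simp [hswV, hswS, hswD]

-- A's whole forward fold is B's three reversed scans (with the start state as default)
theorem pv_foldA (lines : List String)
    (st : Option String × Option String × Option String) :
    lines.foldl pvStepA st =
      (pvLV lines.reverse "Vendor:" st.1, pvLV lines.reverse "Version:" st.2.1,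
       pvLV lines.reverse "Release Date:" st.2.2) := by
  induction lines generalizing st with
  | nil => simp [pvLV]
  | cons l rest ih =>
      rw [List.foldl_cons, ih, pv_stepA_eq]
      simp only [List.reverse_cons, pvLV_append]

-- ===== VERDICT (by name: the statement is the Claim_ definition above) =====
theorem parse_dmidecode_bios_py_spec : Claim_equal_parse_dmidecode_bios_py := by
  intro output _
  unfold Spec_parse_dmidecode_bios_py parse_dmidecode_bios_py parse_dmidecode_bios_py_alt
  rw [PySem.List.slice?_none_none_neg_one]
  simp only [Option.getD_some, pv_foldA, pvLastValue_eq_pvLV]
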